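-- pv_equiv track=rewrite | github.com/AsteriodBlues/Vantage | src/feature_importance.py | categorize_features
-- ===== SOURCE A (Python) =====
-- from typing import Dict, List, Any, Tuple
--
-- def categorize_features(feature_names: List[str]) -> Dict[str, List[str]]:
--     """
--     Group features by category for analysis.
--
--     Args:
--         feature_names: List of all feature names
--
--     Returns:
--         Dictionary mapping category names to feature lists
--     """
--     categories = {
--         'Grid': [],
--         'Circuit': [],
--         'Team': [],
--         'Driver': [],
--         'Temporal': [],
--         'Interaction': []
--     }
--
--     for feature in feature_names:
--         if 'grid' in feature.lower():
--             categories['Grid'].append(feature)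
--         elif 'circuit' in feature.lower() or 'track' in feature.lower():
--             categories['Circuit'].append(feature)
--         elif 'team' in feature.lower() or 'constructor' in feature.lower():
--             categories['Team'].append(feature)
--         elif 'driver' in feature.lower():
--             categories['Driver'].append(feature)
--         elif any(x in feature.lower() for x in ['year', 'race_number', 'round']):
--             categories['Temporal'].append(feature)
--         elif '_x_' in feature.lower() or 'interaction' in feature.lower():
--             categories['Interaction'].append(feature)
--         else:
--             # Default to most likely category based on content
--             if 'avg' in feature.lower() or 'championship' in feature.lower():
--                 categories['Team'].append(feature)
--             else:
--                 categories['Driver'].append(feature)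
--
--     return categories
-- ===== SOURCE B (Python) =====
-- def categorize_features(feature_names):
--     def classify(name):
--         low = name.lower()
--         if 'grid' in low:
--             return 'Grid'
--         if 'circuit' in low or 'track' in low:
--             return 'Circuit'
--         if 'team' in low or 'constructor' in low:
--             return 'Team'
--         if 'driver' in low:
--             return 'Driver'
--         if any(x in low for x in ['year', 'race_number', 'round']):
--             return 'Temporal'
--         if '_x_' in low or 'interaction' in low:
--             return 'Interaction'
--         return 'Team' if 'avg' in low or 'championship' in low else 'Driver'
--
--     return {cat: [f for f in feature_names if classify(f) == cat]
--             for cat in ['Grid', 'Circuit', 'Team', 'Driver', 'Temporal', 'Interaction']}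
-- ===== Notes on version B (the rewrite author's own statement) =====
-- stated objective: alternative
-- what changed: Replaces A's single pass that mutates a dict of lists with a pure classifier function plus a dict comprehension that builds the output category-major: one filter pass over the features per category, no mutable accumulator.
import Mathlib
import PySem

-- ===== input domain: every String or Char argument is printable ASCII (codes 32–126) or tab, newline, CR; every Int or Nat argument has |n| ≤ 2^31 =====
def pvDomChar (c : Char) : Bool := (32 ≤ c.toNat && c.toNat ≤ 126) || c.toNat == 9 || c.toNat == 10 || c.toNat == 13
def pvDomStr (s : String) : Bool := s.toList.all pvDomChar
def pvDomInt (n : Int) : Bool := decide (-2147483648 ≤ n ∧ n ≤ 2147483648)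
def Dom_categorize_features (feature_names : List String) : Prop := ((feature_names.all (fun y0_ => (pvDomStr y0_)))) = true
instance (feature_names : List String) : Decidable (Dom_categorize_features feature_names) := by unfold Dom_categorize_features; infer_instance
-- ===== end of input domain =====

-- B replaces A's single pass mutating a dict of lists by a pure classifier plus a
-- category-major dict comprehension (one filter pass per category, no mutable state);
-- same priorities, same key order, same cost.

-- ===== PORT A =====
-- the initial dict with the six category keys, in A's insertion order
def pvInitCats : PySem.Dict String (List String) :=
  ((((((PySem.Dict.empty.insert "Grid" []).insert "Circuit" []).insert "Team" []).insert
      "Driver" []).insert "Temporal" []).insert "Interaction" [])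

-- categories[cat].append(feature)
def pvAppendCat (d : PySem.Dict String (List String)) (cat feature : String) :
    PySem.Dict String (List String) :=
  d.modify cat [] (fun l => l ++ [feature])

-- one iteration of A's for-loop (the if/elif chain)
def pvStepA (d : PySem.Dict String (List String)) (feature : String) :
    PySem.Dict String (List String) :=
  if PySem.Str.isIn "grid" (PySem.Str.lower feature) then
    pvAppendCat d "Grid" feature
  else if PySem.Str.isIn "circuit" (PySem.Str.lower feature) ||
          PySem.Str.isIn "track" (PySem.Str.lower feature) then
    pvAppendCat d "Circuit" feature
  else if PySem.Str.isIn "team" (PySem.Str.lower feature) ||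
          PySem.Str.isIn "constructor" (PySem.Str.lower feature) then
    pvAppendCat d "Team" feature
  else if PySem.Str.isIn "driver" (PySem.Str.lower feature) then
    pvAppendCat d "Driver" feature
  else if (["year", "race_number", "round"] : List String).any
            (fun x => PySem.Str.isIn x (PySem.Str.lower feature)) then
    pvAppendCat d "Temporal" feature
  else if PySem.Str.isIn "_x_" (PySem.Str.lower feature) ||
          PySem.Str.isIn "interaction" (PySem.Str.lower feature) then
    pvAppendCat d "Interaction" feature
  else
    if PySem.Str.isIn "avg" (PySem.Str.lower feature) ||
       PySem.Str.isIn "championship" (PySem.Str.lower feature) then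
      pvAppendCat d "Team" feature
    else
      pvAppendCat d "Driver" feature

def categorize_features (feature_names : List String) : List (String × List String) :=
  (feature_names.foldl pvStepA pvInitCats).items

-- ===== PORT B =====
-- B's inner 'classify': lowercase once, return the category name
def pvClassify (name : String) : String :=
  let low := PySem.Str.lower name
  if PySem.Str.isIn "grid" low then "Grid"
  else if PySem.Str.isIn "circuit" low || PySem.Str.isIn "track" low then "Circuit"
  else if PySem.Str.isIn "team" low || PySem.Str.isIn "constructor" low then "Team"
  else if PySem.Str.isIn "driver" low then "Driver"
  else if (["year", "race_number", "round"] : List String).any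
            (fun x => PySem.Str.isIn x low) then "Temporal"
  else if PySem.Str.isIn "_x_" low || PySem.Str.isIn "interaction" low then "Interaction"
  else if PySem.Str.isIn "avg" low || PySem.Str.isIn "championship" low then "Team"
  else "Driver"

-- the dict comprehension: one filter pass per category, keys in the fixed order
def categorize_features_alt (feature_names : List String) : List (String × List String) :=
  (["Grid", "Circuit", "Team", "Driver", "Temporal", "Interaction"] : List String).map
    (fun cat => (cat, feature_names.filter (fun f => pvClassify f == cat)))

-- ===== PRECONDITION & SPEC =====
def Spec_categorize_features (feature_names : List String) (out : List (String × List String)) : Prop := out = categorize_features_alt feature_names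
instance (feature_names : List String) (out : List (String × List String)) : Decidable (Spec_categorize_features feature_names out) := by unfold Spec_categorize_features; infer_instance

-- ===== CLAIM (what is proved, stated in full; the proofs are below) =====
def Claim_equal_categorize_features : Prop := ∀ (feature_names : List String), Dom_categorize_features feature_names → Spec_categorize_features feature_names (categorize_features feature_names)

-- ===== LEMMAS AND PROOFS =====
-- A's if/elif chain appends exactly to the category B's classifier names
theorem pvStepA_eq_append_classify (d : PySem.Dict String (List String)) (f : String) :
    pvStepA d f = pvAppendCat d (pvClassify f) f := by
  simp only [pvStepA, pvClassify]
  split_ifs <;> rfl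

theorem pvClassify_mem (f : String) :
    pvClassify f ∈ (["Grid", "Circuit", "Team", "Driver", "Temporal", "Interaction"] : List String) := by
  simp only [pvClassify]
  split_ifs <;> simp

-- ===== VERDICT (by name: the statement is the Claim_ definition above) =====
theorem categorize_features_spec : Claim_equal_categorize_features := by
  intro fns _
  unfold Spec_categorize_features categorize_features categorize_features_alt
  have hstep : fns.foldl pvStepA pvInitCats
      = (fns.map (fun f => (pvClassify f, f))).foldl
          (fun d p => d.modify p.1 [] (fun l => l ++ [p.2])) pvInitCats := by
    rw [List.foldl_map]
    congr 1
    funext d f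
    rw [pvStepA_eq_append_classify]
    rfl
  have hnd : (fns.foldl pvStepA pvInitCats).keys.Nodup := by
    rw [hstep]
    exact PySem.Dict.nodup_keys_foldl_modify_key _ Prod.fst [] _ pvInitCats (by decide)
  have hkeys : (fns.foldl pvStepA pvInitCats).keys
      = (["Grid", "Circuit", "Team", "Driver", "Temporal", "Interaction"] : List String) := by
    rw [hstep, PySem.Dict.keys_foldl_modify_key]
    have : pvInitCats.keys = (["Grid", "Circuit", "Team", "Driver", "Temporal", "Interaction"] : List String) := by decide
    rw [this, PySem.Set.update_eq_append_filter, List.filter_eq_nil_iff.2, List.append_nil]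
    intro y hy
    have hy' := (PySem.Set.mem_ofList _ _).1 hy
    rw [List.map_map] at hy'
    obtain ⟨f, -, rfl⟩ := List.mem_map.1 hy'
    simp only [Function.comp_apply, Bool.not_eq_true', Bool.not_eq_false]
    exact (PySem.Set.contains_iff _ _).2 (pvClassify_mem f)
  rw [PySem.Dict.items_eq_map_keys _ hnd [], hkeys]
  apply List.map_congr_left
  intro c hc
  refine Prod.ext rfl ?_
  show (fns.foldl pvStepA pvInitCats).getD c [] = fns.filter (fun f => pvClassify f == c)
  rw [hstep, PySem.Dict.getD_foldl_modify_append]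
  have hinit : pvInitCats.getD c [] = [] := by
    fin_cases hc <;> rfl
  rw [hinit, List.nil_append, List.filter_map, List.map_map]
  simp [Function.comp_def]
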